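-- pv_equiv track=rewrite | github.com/Huypham07/AutoDocs | back-end/src/domain/rag/graph_rag.py | _rule_based_analyze_page_type
-- ===== SOURCE A (Python) =====
-- def _rule_based_analyze_page_type(page_title: str) -> str:
--     """Fallback rule-based page type analysis."""
--     title_lower = page_title.lower()
--
--     # Architecture and system design
--     if any(word in title_lower for word in ['architecture', 'system design', 'overview', 'structure']):
--         return 'architecture_overview'
--
--     # Technology, integration, API
--     elif any(word in title_lower for word in ['integration', 'api', 'llm', 'vector', 'database', 'technology']):
--         return 'technology_integration'
--
--     # Data flow and processing
--     elif any(word in title_lower for word in ['data flow', 'processing', 'pipeline', 'workflow']):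
--         return 'data_flow'
--
--     # Deployment and infrastructure
--     elif any(word in title_lower for word in ['deployment', 'infrastructure', 'setup', 'configuration']):
--         return 'deployment_infrastructure'
--
--     # Component or cluster specific
--     elif any(word in title_lower for word in ['component', 'module', 'service', 'backend', 'frontend']):
--         return 'component_cluster'
--
--     # Features and functionality
--     elif any(word in title_lower for word in ['feature', 'functionality', 'capability', 'user']):
--         return 'feature_functionality'
--
--     else:
--         return 'feature_functionality'  # Default fallback
-- ===== SOURCE B (Python) =====
-- PAGE_TYPES = [
--     'architecture_overview',
--     'technology_integration',
--     'data_flow',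
--     'deployment_infrastructure',
--     'component_cluster',
--     'feature_functionality',
-- ]
--
-- # Flat keyword -> priority-rank table (rank = index into PAGE_TYPES).
-- KEYWORD_RANK = {
--     'architecture': 0, 'system design': 0, 'overview': 0, 'structure': 0,
--     'integration': 1, 'api': 1, 'llm': 1, 'vector': 1, 'database': 1, 'technology': 1,
--     'data flow': 2, 'processing': 2, 'pipeline': 2, 'workflow': 2,
--     'deployment': 3, 'infrastructure': 3, 'setup': 3, 'configuration': 3,
--     'component': 4, 'module': 4, 'service': 4, 'backend': 4, 'frontend': 4,
-- }
--
--
-- def _rule_based_analyze_page_type(page_title: str) -> str: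
--     """Arg-min over a flat keyword->rank table instead of a branch chain."""
--     title_lower = page_title.lower()
--     best = 5  # rank of the default label
--     for keyword, rank in KEYWORD_RANK.items():
--         if rank < best and keyword in title_lower:
--             best = rank
--     return PAGE_TYPES[best]
-- ===== Notes on version B (the rewrite author's own statement) =====
-- stated objective: alternative
-- what changed: Replaces the six-branch if/elif chain of per-group any() scans with a flat keyword->rank dictionary and a single accumulator loop that computes the minimum matching rank, then indexes a label table (the redundant final branch collapses into the default rank).
import Mathlib
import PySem

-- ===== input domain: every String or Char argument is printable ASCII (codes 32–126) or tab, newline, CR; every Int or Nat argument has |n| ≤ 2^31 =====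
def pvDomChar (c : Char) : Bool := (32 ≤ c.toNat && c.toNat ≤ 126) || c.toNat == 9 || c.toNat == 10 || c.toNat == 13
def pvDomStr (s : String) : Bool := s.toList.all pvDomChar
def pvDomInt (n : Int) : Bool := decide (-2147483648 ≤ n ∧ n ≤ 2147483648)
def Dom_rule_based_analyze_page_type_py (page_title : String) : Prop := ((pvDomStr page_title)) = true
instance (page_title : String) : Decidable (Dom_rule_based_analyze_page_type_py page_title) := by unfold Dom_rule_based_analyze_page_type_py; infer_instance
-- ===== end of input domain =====

-- B replaces A's if/elif chain by an arg-min accumulator loop over a flat keyword->rank table; equal return values on all inputs.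

-- ===== PORT A =====
-- Literal transliteration of A's if/elif chain of any(word in title_lower …) tests.
def rule_based_analyze_page_type_py (page_title : String) : String :=
  let title_lower := PySem.Str.lower page_title
  if ["architecture", "system design", "overview", "structure"].any (fun w => PySem.Str.isIn w title_lower) then
    "architecture_overview"
  else if ["integration", "api", "llm", "vector", "database", "technology"].any (fun w => PySem.Str.isIn w title_lower) then
    "technology_integration"
  else if ["data flow", "processing", "pipeline", "workflow"].any (fun w => PySem.Str.isIn w title_lower) then
    "data_flow"
  else if ["deployment", "infrastructure", "setup", "configuration"].any (fun w => PySem.Str.isIn w title_lower) then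
    "deployment_infrastructure"
  else if ["component", "module", "service", "backend", "frontend"].any (fun w => PySem.Str.isIn w title_lower) then
    "component_cluster"
  else if ["feature", "functionality", "capability", "user"].any (fun w => PySem.Str.isIn w title_lower) then
    "feature_functionality"
  else
    "feature_functionality"

-- ===== PORT B =====
-- B's label table and flat keyword->rank dict (association list in insertion order).
def pvPageTypes : List String :=
  ["architecture_overview", "technology_integration", "data_flow",
   "deployment_infrastructure", "component_cluster", "feature_functionality"]

def pvKeywordRank : List (String × Nat) :=
  [("architecture", 0), ("system design", 0), ("overview", 0), ("structure", 0),
   ("integration", 1), ("api", 1), ("llm", 1), ("vector", 1), ("database", 1), ("technology", 1),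
   ("data flow", 2), ("processing", 2), ("pipeline", 2), ("workflow", 2),
   ("deployment", 3), ("infrastructure", 3), ("setup", 3), ("configuration", 3),
   ("component", 4), ("module", 4), ("service", 4), ("backend", 4), ("frontend", 4)]

-- B: one accumulator loop computing the minimum matching rank, then an index into the label
-- table (best ≤ 5 always, so List.getD is exact for Python's PAGE_TYPES[best]).
def rule_based_analyze_page_type_py_alt (page_title : String) : String :=
  let title_lower := PySem.Str.lower page_title
  let best := pvKeywordRank.foldl
    (fun best kr => if kr.2 < best && PySem.Str.isIn kr.1 title_lower then kr.2 else best) 5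
  pvPageTypes.getD best ""

-- ===== PRECONDITION & SPEC =====
def Spec_rule_based_analyze_page_type_py (page_title : String) (out : String) : Prop := out = rule_based_analyze_page_type_py_alt page_title
instance (page_title : String) (out : String) : Decidable (Spec_rule_based_analyze_page_type_py page_title out) := by unfold Spec_rule_based_analyze_page_type_py; infer_instance

-- ===== CLAIM =====
def Claim_equal_rule_based_analyze_page_type_py : Prop := ∀ (page_title : String), Dom_rule_based_analyze_page_type_py page_title → Spec_rule_based_analyze_page_type_py page_title (rule_based_analyze_page_type_py page_title)

-- ===== LEMMAS AND PROOFS =====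

-- Folding B's accumulator step over one constant-rank group reduces to an `any` test.
theorem pvFoldGroup (t : String) (l : List String) (i b : Nat) :
    (l.map (fun kw => (kw, i))).foldl
      (fun best kr => if kr.2 < best && PySem.Str.isIn kr.1 t then kr.2 else best) b
    = if i < b && l.any (fun w => PySem.Str.isIn w t) then i else b := by
  induction l generalizing b with
  | nil => simp
  | cons k rest ih =>
    simp only [List.map_cons, List.foldl_cons, List.any_cons]
    rw [ih]
    by_cases h2 : PySem.Str.isIn k t = true <;>
      by_cases h1 : i < b <;>
        simp only [h2, h1, decide_true, decide_false, Bool.true_and, Bool.false_and,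
          Bool.and_true, Bool.and_false, Bool.true_or, Bool.false_or, if_true,
          Nat.lt_irrefl, ite_self] <;>
        simp [h1]

-- B's flat table is the concatenation of the six rule groups tagged with their ranks.
theorem pvKeywordRank_eq :
    pvKeywordRank =
      (["architecture", "system design", "overview", "structure"].map (fun kw => (kw, 0)))
      ++ (["integration", "api", "llm", "vector", "database", "technology"].map (fun kw => (kw, 1)))
      ++ (["data flow", "processing", "pipeline", "workflow"].map (fun kw => (kw, 2)))
      ++ (["deployment", "infrastructure", "setup", "configuration"].map (fun kw => (kw, 3)))
      ++ (["component", "module", "service", "backend", "frontend"].map (fun kw => (kw, 4))) := rfl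

-- ===== VERDICT =====
theorem rule_based_analyze_page_type_py_spec : Claim_equal_rule_based_analyze_page_type_py := by
  intro s _
  show rule_based_analyze_page_type_py s = rule_based_analyze_page_type_py_alt s
  simp only [rule_based_analyze_page_type_py, rule_based_analyze_page_type_py_alt,
    pvKeywordRank_eq, List.foldl_append, pvFoldGroup]
  by_cases g0 : ["architecture", "system design", "overview", "structure"].any (fun w => PySem.Str.isIn w (PySem.Str.lower s)) = true
  · simp_all [pvPageTypes]
  by_cases g1 : ["integration", "api", "llm", "vector", "database", "technology"].any (fun w => PySem.Str.isIn w (PySem.Str.lower s)) = true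
  · simp_all [pvPageTypes]
  by_cases g2 : ["data flow", "processing", "pipeline", "workflow"].any (fun w => PySem.Str.isIn w (PySem.Str.lower s)) = true
  · simp_all [pvPageTypes]
  by_cases g3 : ["deployment", "infrastructure", "setup", "configuration"].any (fun w => PySem.Str.isIn w (PySem.Str.lower s)) = true
  · simp_all [pvPageTypes]
  by_cases g4 : ["component", "module", "service", "backend", "frontend"].any (fun w => PySem.Str.isIn w (PySem.Str.lower s)) = true
  · simp_all [pvPageTypes]
  · simp_all [pvPageTypes]
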